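-- pv_equiv track=rewrite | github.com/bryanmiller/GreedyMaxScheduler | odb_extractor_atoms.py | select_obsclass
-- ===== SOURCE A (Python) =====
-- def select_obsclass(classes):
--     """Return the obsclass based on precedence
--
--         classes: list of observe classes from the ODB extractor
--     """
--     obsclass = ''
--
--     # Precedence order for observation classes.
--     obsclass_order = ['SCIENCE', 'PROGCAL', 'PARTNERCAL', 'ACQ', 'ACQCAL', 'DAYCAL']
--
--     # Set the obsclass for the entire observation based on obsclass precedence
--     for oclass in obsclass_order:
--         if oclass in classes:
--             obsclass = oclass
--             break
--
--     return obsclass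
-- ===== SOURCE B (Python) =====
-- def select_obsclass(classes):
--     """Return the obsclass based on precedence
--
--         classes: list of observe classes from the ODB extractor
--     """
--     rank = {c: i for i, c in enumerate(['SCIENCE', 'PROGCAL', 'PARTNERCAL', 'ACQ', 'ACQCAL', 'DAYCAL'])}
--     best = ''
--     best_rank = None
--     for c in classes:
--         r = rank.get(c)
--         if r is not None and (best_rank is None or r < best_rank):
--             best = c
--             best_rank = r
--     return best
-- ===== Notes on version B (the rewrite author's own statement) =====
-- stated objective: alternative
-- what changed: B builds a name->rank dict once and makes one pass over the input keeping the element of minimum rank, instead of scanning the fixed precedence list and testing membership of each name in the input.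
import Mathlib
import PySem

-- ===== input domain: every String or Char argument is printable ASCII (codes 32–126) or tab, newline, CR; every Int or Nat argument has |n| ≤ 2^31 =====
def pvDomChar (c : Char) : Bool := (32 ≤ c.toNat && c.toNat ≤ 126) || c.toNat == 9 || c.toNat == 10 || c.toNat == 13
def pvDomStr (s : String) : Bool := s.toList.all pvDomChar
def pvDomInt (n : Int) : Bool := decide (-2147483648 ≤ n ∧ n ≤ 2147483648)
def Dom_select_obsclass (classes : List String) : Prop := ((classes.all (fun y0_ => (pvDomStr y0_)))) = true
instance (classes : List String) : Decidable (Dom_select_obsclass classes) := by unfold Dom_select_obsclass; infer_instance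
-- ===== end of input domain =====

-- B replaces A's scan over the fixed precedence list (membership test per name, early break)
-- by a single pass over the input keeping the element of minimum rank from a name->rank dict (objective: alternative).

-- ===== PORT A =====
def pvObsOrder : List String := ["SCIENCE", "PROGCAL", "PARTNERCAL", "ACQ", "ACQCAL", "DAYCAL"]

-- the for-loop with break over obsclass_order
def pvLoopA (classes : List String) : List String → String
  | [] => ""
  | o :: rest => if classes.contains o then o else pvLoopA classes rest

def select_obsclass (classes : List String) : String :=
  pvLoopA classes pvObsOrder

-- ===== PORT B =====
def pvRankDict : PySem.Dict String Int :=
  PySem.Dict.ofList [("SCIENCE", 0), ("PROGCAL", 1), ("PARTNERCAL", 2), ("ACQ", 3), ("ACQCAL", 4), ("DAYCAL", 5)]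

-- loop body: r = rank.get(c); if r is not None and (best_rank is None or r < best_rank): best, best_rank = c, r
def pvStepB (st : String × Option Int) (c : String) : String × Option Int :=
  match pvRankDict.get? c with
  | none => st
  | some r =>
    match st.2 with
    | none => (c, some r)
    | some br => if r < br then (c, some r) else st

def select_obsclass_alt (classes : List String) : String :=
  (classes.foldl pvStepB ("", none)).1

-- ===== PRECONDITION & SPEC =====
def Spec_select_obsclass (classes : List String) (out : String) : Prop := out = select_obsclass_alt classes
instance (classes : List String) (out : String) : Decidable (Spec_select_obsclass classes out) := by unfold Spec_select_obsclass; infer_instance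

-- ===== CLAIM (what is proved, stated in full; the proofs are below) =====
def Claim_equal_select_obsclass : Prop := ∀ (classes : List String), Dom_select_obsclass classes → Spec_select_obsclass classes (select_obsclass classes)

-- ===== LEMMAS AND PROOFS =====

-- min on Option Int (none = +infinity), matching the loop's strict-< update
def pvMerge : Option Int → Option Int → Option Int
  | m, none => m
  | none, some r => some r
  | some br, some r => some (if r < br then r else br)

def pvNameOf (r : Int) : String :=
  if r = 0 then "SCIENCE" else if r = 1 then "PROGCAL" else if r = 2 then "PARTNERCAL"
  else if r = 3 then "ACQ" else if r = 4 then "ACQCAL" else if r = 5 then "DAYCAL" else ""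

def pvStateOf : Option Int → String × Option Int
  | none => ("", none)
  | some r => (pvNameOf r, some r)

-- index of the highest-precedence name present, as A's membership chain
def pvChainIdx (l : List String) : Option Int :=
  if l.contains "SCIENCE" then some 0 else if l.contains "PROGCAL" then some 1
  else if l.contains "PARTNERCAL" then some 2 else if l.contains "ACQ" then some 3
  else if l.contains "ACQCAL" then some 4 else if l.contains "DAYCAL" then some 5 else none

lemma pvRankDict_mk : pvRankDict = PySem.Dict.mk
    [("SCIENCE", 0), ("PROGCAL", 1), ("PARTNERCAL", 2), ("ACQ", 3), ("ACQCAL", 4), ("DAYCAL", 5)] := by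
  decide

lemma pvRank_eq (c : String) : pvRankDict.get? c =
    (if c = "SCIENCE" then some (0 : Int) else if c = "PROGCAL" then some 1
     else if c = "PARTNERCAL" then some 2 else if c = "ACQ" then some 3
     else if c = "ACQCAL" then some 4 else if c = "DAYCAL" then some 5 else none) := by
  rw [pvRankDict_mk]
  simp only [PySem.Dict.get?_mk_cons]
  split_ifs <;> simp_all [PySem.Dict.get?]

lemma pvStepB_stateOf (m : Option Int) (c : String) :
    pvStepB (pvStateOf m) c = pvStateOf (pvMerge m (pvRankDict.get? c)) := by
  unfold pvStepB
  rw [pvRank_eq]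
  split_ifs with h0 h1 h2 h3 h4 h5 <;> subst_vars <;>
    cases m with
    | none => rfl
    | some br =>
      simp only [pvStateOf, pvMerge]
      all_goals (split_ifs with hbr <;> norm_num [pvStateOf, pvNameOf])

lemma pvFoldB_stateOf (l : List String) (m : Option Int) :
    l.foldl pvStepB (pvStateOf m) =
      pvStateOf (l.foldl (fun m c => pvMerge m (pvRankDict.get? c)) m) := by
  induction l generalizing m with
  | nil => rfl
  | cons c rest ih => simp only [List.foldl, pvStepB_stateOf]; exact ih _

lemma pvMerge_assoc (a b c : Option Int) :
    pvMerge (pvMerge a b) c = pvMerge a (pvMerge b c) := by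
  cases a <;> cases b <;> cases c <;>
    simp only [pvMerge] <;> (try split_ifs) <;> (try simp_all) <;> omega

lemma pvMerge_rank_chain (c : String) (rest : List String) :
    pvMerge (pvRankDict.get? c) (pvChainIdx rest) = pvChainIdx (c :: rest) := by
  rw [pvRank_eq]
  split_ifs with h0 h1 h2 h3 h4 h5 <;> subst_vars <;>
    (simp [pvChainIdx]; split_ifs <;> simp_all [pvMerge])

lemma pvFoldMin_eq (l : List String) (m : Option Int) :
    l.foldl (fun m c => pvMerge m (pvRankDict.get? c)) m = pvMerge m (pvChainIdx l) := by
  induction l generalizing m with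
  | nil => cases m <;> rfl
  | cons c rest ih =>
    simp only [List.foldl]
    rw [ih, pvMerge_assoc, pvMerge_rank_chain]

lemma pvChain_name (l : List String) :
    (pvStateOf (pvChainIdx l)).1 = pvLoopA l pvObsOrder := by
  simp only [pvChainIdx, pvObsOrder, pvLoopA]
  split_ifs <;> rfl

-- ===== VERDICT (by name: the statement is the Claim_ definition above) =====
theorem select_obsclass_spec : Claim_equal_select_obsclass := by
  intro classes _
  show select_obsclass classes = select_obsclass_alt classes
  have h0 : (("", none) : String × Option Int) = pvStateOf none := rfl
  rw [select_obsclass_alt, h0, pvFoldB_stateOf, pvFoldMin_eq]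
  have : pvMerge none (pvChainIdx classes) = pvChainIdx classes := by
    cases pvChainIdx classes <;> rfl
  rw [this, pvChain_name, select_obsclass]
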